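-- pv_equiv track=rewrite | github.com/craig3050/100DaysOfCode | Day16-18/Day18.py | sort_by_surname_desc
-- ===== SOURCE A (Python) =====
-- def dedup_and_title_case_names(names):
--
--     new_name_list = [name.title() for name in names]
--     new_name_list = list(set(new_name_list))
--
--     return new_name_list
--
-- def sort_by_surname_desc(names):
--     """Returns names list sorted desc by surname"""
--     names = dedup_and_title_case_names(names)
--     output_name = []
--     for name in names:
--         new_name = name.split()
--         output_name.append(new_name[1] + " " + new_name[0])
--     output_name2 = []
--     for name in sorted(output_name, reverse=True):
--         new_name = name.split()
--         output_name2.append(new_name[1] + " " + new_name[0])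
--     return output_name2
-- ===== SOURCE B (Python) =====
-- def sort_by_surname_desc(names):
--     """Returns names list sorted desc by surname"""
--     seen = set()
--     decorated = []
--     for name in names:
--         t = name.title()
--         if t in seen:
--             continue
--         seen.add(t)
--         parts = t.split()
--         key = parts[1] + " " + parts[0]
--         i = 0
--         while i < len(decorated) and decorated[i] >= key:
--             i += 1
--         decorated.insert(i, key)
--     return [d.split()[1] + " " + d.split()[0] for d in decorated]
-- ===== Notes on version B (the rewrite author's own statement) =====
-- stated objective: alternative
-- what changed: A stages three passes (dedup via set(), decorate all names into a 'Surname First' list, library-sort it, then a second loop to un-decorate); B is a single pass with an accumulator: it dedups on the fly with a seen-set and maintains the decorated list in descending order by hand-written linear insertion (an online insertion sort), replacing the library sort and both staged loops.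
import Mathlib
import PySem

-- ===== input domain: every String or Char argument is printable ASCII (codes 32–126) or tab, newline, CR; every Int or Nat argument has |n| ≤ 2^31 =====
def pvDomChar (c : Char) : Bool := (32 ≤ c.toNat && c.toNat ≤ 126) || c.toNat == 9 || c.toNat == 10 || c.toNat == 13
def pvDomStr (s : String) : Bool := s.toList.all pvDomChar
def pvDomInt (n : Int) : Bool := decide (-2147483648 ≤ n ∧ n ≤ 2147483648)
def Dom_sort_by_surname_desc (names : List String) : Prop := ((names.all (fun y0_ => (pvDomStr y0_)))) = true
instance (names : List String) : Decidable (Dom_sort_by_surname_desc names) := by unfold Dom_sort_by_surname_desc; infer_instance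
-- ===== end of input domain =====

-- B replaces A's three staged passes (set() dedup, decorate loop, library sort, un-decorate loop)
-- with one pass that dedups on the fly and keeps the decorated list descending by linear insertion
-- (an online insertion sort); same return value, no speed claim (B is O(n^2)).


-- ===== PORT A =====
-- str.title(), exact on ASCII: a letter is uppercased after a non-letter, lowercased after a letter.
def pvTitleGo : List Char → Bool → List Char
  | [], _ => []
  | c :: rest, prevCased =>
      if PySem.Chars.isalpha c then
        (if prevCased then PySem.Chars.lowerChar c else PySem.Chars.upperChar c) :: pvTitleGo rest true
      else c :: pvTitleGo rest false

def pyTitle (s : String) : String := String.ofList (pvTitleGo s.toList false)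

def dedup_and_title_case_names (names : List String) : List String :=
  PySem.Set.ofList (names.map pyTitle)

def sort_by_surname_desc (names : List String) : List String :=
  let names' := dedup_and_title_case_names names
  let output_name := names'.foldl (fun acc name =>
    let new_name := PySem.Str.split₀ name
    acc ++ [PySem.Str.join " " [(PySem.List.pyGet? new_name 1).getD "", (PySem.List.pyGet? new_name 0).getD ""]]) []
  let output_name2 := (PySem.List.sorted output_name (fun x => x) true).foldl (fun acc name =>
    let new_name := PySem.Str.split₀ name
    acc ++ [PySem.Str.join " " [(PySem.List.pyGet? new_name 1).getD "", (PySem.List.pyGet? new_name 0).getD ""]]) []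
  output_name2

-- ===== PORT B =====
-- the while-loop of Source B: walk past every element ≥ key, insert key there
def pvInsDesc (key : String) : List String → List String
  | [] => [key]
  | d :: rest => if key ≤ d then d :: pvInsDesc key rest else key :: d :: rest

def sort_by_surname_desc_alt (names : List String) : List String :=
  let st := names.foldl (fun (st : PySem.Set String × List String) name =>
    let t := pyTitle name
    if PySem.Set.contains st.1 t then st
    else
      let parts := PySem.Str.split₀ t
      let key := PySem.Str.join " " [(PySem.List.pyGet? parts 1).getD "", (PySem.List.pyGet? parts 0).getD ""]
      (PySem.Set.add st.1 t, pvInsDesc key st.2)) (PySem.Set.empty, [])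
  st.2.map (fun d =>
    PySem.Str.join " " [(PySem.List.pyGet? (PySem.Str.split₀ d) 1).getD "", (PySem.List.pyGet? (PySem.Str.split₀ d) 0).getD ""])

-- ===== PRECONDITION & SPEC =====
-- Pre_ excludes exactly the inputs where Python A raises IndexError: a name with fewer than
-- two whitespace-separated tokens (title-casing never changes the token count; B raises there too).
def Pre_sort_by_surname_desc (names : List String) : Prop :=
  ∀ name ∈ names, 2 ≤ (PySem.Str.split₀ name).length
instance (names : List String) : Decidable (Pre_sort_by_surname_desc names) := by unfold Pre_sort_by_surname_desc; infer_instance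

def pvWitness_sort_by_surname_desc : List String := ["smith john", "doe JANE", "Smith John"]

def Spec_sort_by_surname_desc (names : List String) (out : List String) : Prop := out = sort_by_surname_desc_alt names
instance (names : List String) (out : List String) : Decidable (Spec_sort_by_surname_desc names out) := by unfold Spec_sort_by_surname_desc; infer_instance

-- ===== CLAIM (what is proved, stated in full; the proofs are below) =====
def Claim_equal_sort_by_surname_desc : Prop := ∀ (names : List String), Dom_sort_by_surname_desc names → Pre_sort_by_surname_desc names → Spec_sort_by_surname_desc names (sort_by_surname_desc names)

-- ===== LEMMAS AND PROOFS =====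

-- the "Surname First" decoration of a name
def pvSwap (name : String) : String :=
  PySem.Str.join " " [(PySem.List.pyGet? (PySem.Str.split₀ name) 1).getD "", (PySem.List.pyGet? (PySem.Str.split₀ name) 0).getD ""]

-- B's linear insertion is exactly PySem's insertBy with the descending-order predicate
lemma insDesc_eq_insertBy (key : String) (l : List String) :
    pvInsDesc key l = PySem.List.insertBy (fun a b => decide (b < a)) key l := by
  induction l with
  | nil => rfl
  | cons d rest ih =>
      simp only [pvInsDesc, PySem.List.insertBy]
      by_cases h : key ≤ d
      · simp [h, not_lt.mpr h, ih]
      · simp [h, not_le.mp h]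

abbrev pvIns (acc : List String) (k : String) : List String :=
  PySem.List.insertBy (fun a b => decide (b < a)) k acc

-- Set.update only appends new elements
lemma update_prefix (l : List String) : ∀ (s : PySem.Set String),
    ∃ r, PySem.Set.update s l = s ++ r := by
  induction l with
  | nil => intro s; exact ⟨[], by simp [PySem.Set.update]⟩
  | cons x t ih =>
      intro s
      have : PySem.Set.update s (x :: t) = PySem.Set.update (PySem.Set.add s x) t := rfl
      obtain ⟨r, hr⟩ := ih (PySem.Set.add s x)
      by_cases h : x ∈ s
      · exact ⟨r, by rw [this, hr]; simp [PySem.Set.add, PySem.Set.contains, h]⟩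
      · exact ⟨x :: r, by rw [this, hr]; simp [PySem.Set.add, PySem.Set.contains, h]⟩

-- fold-fusion: B's one-pass state fold = (updated seen-set, insertion fold over the newly kept decorations)
lemma fuse (l : List String) : ∀ (s : PySem.Set String) (dec : List String),
    l.foldl (fun (st : PySem.Set String × List String) name =>
      let t := pyTitle name
      if PySem.Set.contains st.1 t then st
      else (PySem.Set.add st.1 t, pvInsDesc (pvSwap t) st.2)) (s, dec)
    = (PySem.Set.update s (l.map pyTitle),
       (((PySem.Set.update s (l.map pyTitle)).drop s.length).map pvSwap).foldl pvIns dec) := by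
  induction l with
  | nil => intro s dec; simp [PySem.Set.update]
  | cons n t ih =>
      intro s dec
      simp only [List.foldl_cons, List.map_cons]
      have hup : ∀ s', PySem.Set.update s' (pyTitle n :: t.map pyTitle)
          = PySem.Set.update (PySem.Set.add s' (pyTitle n)) (t.map pyTitle) := fun _ => rfl
      by_cases h : PySem.Set.contains s (pyTitle n) = true
      · have hmem : pyTitle n ∈ s := by simpa [PySem.Set.contains] using h
        simp only [h, if_true]
        rw [ih s dec, hup s]
        simp [PySem.Set.add, PySem.Set.contains, hmem]
      · simp only [h, Bool.false_eq_true, if_false]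
        rw [ih (PySem.Set.add s (pyTitle n)) (pvInsDesc (pvSwap (pyTitle n)) dec), hup s]
        have hadd : PySem.Set.add s (pyTitle n) = s ++ [pyTitle n] := by
          have : pyTitle n ∉ s := by simpa [PySem.Set.contains] using h
          simp [PySem.Set.add, PySem.Set.contains, this]
        obtain ⟨r, hr⟩ := update_prefix (t.map pyTitle) (PySem.Set.add s (pyTitle n))
        rw [hr, hadd]
        have h1 : ((s ++ [pyTitle n] ++ r).drop s.length) = pyTitle n :: r := by
          rw [List.append_assoc, List.drop_append_of_le_length (by simp)]
          simp
        have h2 : ((s ++ [pyTitle n] ++ r).drop (s ++ [pyTitle n]).length) = r := by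
          rw [List.drop_append_of_le_length (by simp)]
          simp
        rw [h1, h2]
        simp [insDesc_eq_insertBy, pvIns]

lemma portA_eq (names : List String) :
    sort_by_surname_desc names =
      (((PySem.Set.ofList (names.map pyTitle)).map pvSwap).foldl pvIns []).map pvSwap := by
  simp only [sort_by_surname_desc, dedup_and_title_case_names,
    PySem.List.foldl_append_singleton_eq_map, List.nil_append]
  rw [PySem.List.sorted_rev_eq_foldl_insertBy]
  rfl

lemma portB_eq (names : List String) :
    sort_by_surname_desc_alt names =
      (((PySem.Set.ofList (names.map pyTitle)).map pvSwap).foldl pvIns []).map pvSwap := by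
  show (names.foldl (fun (st : PySem.Set String × List String) name =>
      let t := pyTitle name
      if PySem.Set.contains st.1 t then st
      else (PySem.Set.add st.1 t, pvInsDesc (pvSwap t) st.2)) (PySem.Set.empty, [])).2.map pvSwap = _
  rw [fuse]
  have h0 : PySem.Set.update [] (names.map pyTitle) = PySem.Set.ofList (names.map pyTitle) := rfl
  simp [PySem.Set.empty, h0]

-- ===== VERDICT (by name: the statement is the Claim_ definition above) =====
theorem sort_by_surname_desc_spec : Claim_equal_sort_by_surname_desc := by
  intro names _hdom _hpre
  unfold Spec_sort_by_surname_desc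
  rw [portA_eq, portB_eq]
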